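-- pv_equiv track=rewrite | github.com/emrahcimren/cvrptw-optimization | cvrptw_optimization/src/single_depot_column_generation_pulp_inputs.py | calculate_path_customer_allocation
-- ===== SOURCE A (Python) =====
-- def calculate_path_customer_allocation(paths_dict, customers_list):
--     '''
--     Calculate customer allocation
--     :param paths_dict:
--     :param customers_list:
--     :return:
--     '''
--
--     paths_customers_dict = {}
--     for path in paths_dict.keys():
--         for customer in customers_list:
--             if customer in paths_dict[path]:
--                 paths_customers_dict[path, customer] = 1
--             else:
--                 paths_customers_dict[path, customer] = 0
--
--     return paths_customers_dict
-- ===== SOURCE B (Python) =====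
-- def calculate_path_customer_allocation(paths_dict, customers_list):
--     # Pre-zero the full table in A's key order, then flip to 1 by scanning
--     # each path's contents against a set of customers.
--     paths_customers_dict = {}
--     for path in paths_dict.keys():
--         for customer in customers_list:
--             paths_customers_dict[path, customer] = 0
--     customers = set(customers_list)
--     for path in paths_dict.keys():
--         for element in paths_dict[path]:
--             if element in customers:
--                 paths_customers_dict[path, element] = 1
--     return paths_customers_dict
-- ===== Notes on version B (the rewrite author's own statement) =====
-- stated objective: alternative
-- what changed: Instead of testing every (path, customer) pair against the path's element list, B pre-fills the whole table with 0 in the same key order and then makes one pass over each path's actual contents, flipping matching entries to 1 via a set of customers.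
import Mathlib
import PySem

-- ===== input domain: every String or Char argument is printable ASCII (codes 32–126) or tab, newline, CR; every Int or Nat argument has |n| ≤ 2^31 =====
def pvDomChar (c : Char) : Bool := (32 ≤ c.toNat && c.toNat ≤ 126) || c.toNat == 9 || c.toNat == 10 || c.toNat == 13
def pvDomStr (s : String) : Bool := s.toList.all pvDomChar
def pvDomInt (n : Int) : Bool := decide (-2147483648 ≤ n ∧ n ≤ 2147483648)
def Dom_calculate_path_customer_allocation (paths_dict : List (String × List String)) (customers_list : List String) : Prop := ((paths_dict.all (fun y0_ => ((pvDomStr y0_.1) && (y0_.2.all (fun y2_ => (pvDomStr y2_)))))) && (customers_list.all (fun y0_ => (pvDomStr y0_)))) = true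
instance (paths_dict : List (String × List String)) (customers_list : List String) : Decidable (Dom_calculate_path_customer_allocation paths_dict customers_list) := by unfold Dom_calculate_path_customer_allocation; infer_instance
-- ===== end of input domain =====

-- Alternative decomposition: B pre-zeroes the full (path, customer) table and then scans each
-- path's contents against a set of customers, instead of A's per-pair membership test.


-- ===== PORT A =====
def calculate_path_customer_allocation (paths_dict : List (String × List String)) (customers_list : List String) : List (String × String × Int) :=
  let pd : PySem.Dict String (List String) := PySem.Dict.ofList paths_dict
  let res : PySem.Dict (String × String) Int :=
    pd.keys.foldl (fun acc path =>
      customers_list.foldl (fun acc customer =>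
        if (pd.getD path []).contains customer then acc.insert (path, customer) 1
        else acc.insert (path, customer) 0) acc) PySem.Dict.empty
  res.items.map (fun p => (p.1.1, p.1.2, p.2))

-- ===== PORT B =====
def calculate_path_customer_allocation_alt (paths_dict : List (String × List String)) (customers_list : List String) : List (String × String × Int) :=
  let pd : PySem.Dict String (List String) := PySem.Dict.ofList paths_dict
  let table0 : PySem.Dict (String × String) Int :=
    pd.keys.foldl (fun acc path =>
      customers_list.foldl (fun acc customer => acc.insert (path, customer) 0) acc) PySem.Dict.empty
  let customers : PySem.Set String := PySem.Set.ofList customers_list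
  let table : PySem.Dict (String × String) Int :=
    pd.keys.foldl (fun acc path =>
      (pd.getD path []).foldl (fun acc e =>
        if PySem.Set.contains customers e then acc.insert (path, e) 1 else acc) acc) table0
  table.items.map (fun p => (p.1.1, p.1.2, p.2))

-- ===== PRECONDITION & SPEC =====
def Spec_calculate_path_customer_allocation (paths_dict : List (String × List String)) (customers_list : List String) (out : List (String × String × Int)) : Prop := out = calculate_path_customer_allocation_alt paths_dict customers_list
instance (paths_dict : List (String × List String)) (customers_list : List String) (out : List (String × String × Int)) : Decidable (Spec_calculate_path_customer_allocation paths_dict customers_list out) := by unfold Spec_calculate_path_customer_allocation; infer_instance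

-- ===== CLAIM (what is proved, stated in full; the proofs are below) =====
def Claim_equal_calculate_path_customer_allocation : Prop := ∀ (paths_dict : List (String × List String)) (customers_list : List String), Dom_calculate_path_customer_allocation paths_dict customers_list → Spec_calculate_path_customer_allocation paths_dict customers_list (calculate_path_customer_allocation paths_dict customers_list)

-- ===== LEMMAS AND PROOFS =====

-- getD after a fold that inserts value `val k` at each key k of `ks`
theorem getD_foldl_insert_fn {κ ν : Type} [BEq κ] [LawfulBEq κ] [DecidableEq κ] (val : κ → ν) (ks : List κ)
    (d : PySem.Dict κ ν) (k : κ) (d0 : ν) :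
    (ks.foldl (fun d x => d.insert x (val x)) d).getD k d0
      = if k ∈ ks then val k else d.getD k d0 := by
  induction ks generalizing d with
  | nil => simp
  | cons a as ih =>
    simp only [List.foldl_cons, ih, PySem.Dict.getD_insert, List.mem_cons]
    by_cases hk : k ∈ as <;> by_cases ha : k = a <;> simp [hk, ha]

-- nested fold over a flatMap
theorem foldl_flatMap_eq {α β σ : Type} (f : σ → β → σ) (g : α → List β) (l : List α) (init : σ) :
    (l.flatMap g).foldl f init = l.foldl (fun acc a => (g a).foldl f acc) init := by
  induction l generalizing init with
  | nil => rfl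
  | cons a as ih => simp [List.flatMap_cons, List.foldl_append, ih]

-- the value A assigns to key k = (path, customer): 1 iff customer occurs in the path's contents
def pvVal (pd : PySem.Dict String (List String)) (k : String × String) : Int :=
  if (pd.getD k.1 []).contains k.2 then 1 else 0

-- the full key sequence both programs insert over (A once, B's zero pass)
def pvL (pd : PySem.Dict String (List String)) (customers_list : List String) : List (String × String) :=
  pd.keys.flatMap (fun p => customers_list.map (fun c => (p, c)))

-- the keys B's second pass overwrites with 1
def pvL2 (pd : PySem.Dict String (List String)) (customers : PySem.Set String) : List (String × String) :=
  pd.keys.flatMap (fun p =>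
    ((pd.getD p []).filter (fun e => PySem.Set.contains customers e)).map (fun e => (p, e)))

theorem A_flat (pd : PySem.Dict String (List String)) (customers_list : List String)
    (d : PySem.Dict (String × String) Int) :
    pd.keys.foldl (fun acc path =>
      customers_list.foldl (fun acc customer =>
        if (pd.getD path []).contains customer then acc.insert (path, customer) 1
        else acc.insert (path, customer) 0) acc) d
    = (pvL pd customers_list).foldl (fun d k => d.insert k (pvVal pd k)) d := by
  unfold pvL
  rw [foldl_flatMap_eq]
  have hstep : (fun (acc : PySem.Dict (String × String) Int) (p : String) =>
      (customers_list.map (fun c => (p, c))).foldl (fun d k => d.insert k (pvVal pd k)) acc)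
      = (fun acc p => customers_list.foldl (fun acc customer =>
        if (pd.getD p []).contains customer then acc.insert (p, customer) 1
        else acc.insert (p, customer) 0) acc) := by
    funext acc p
    rw [List.foldl_map]
    have : (fun (x : PySem.Dict (String × String) Int) (c : String) => x.insert (p, c) (pvVal pd (p, c)))
        = (fun x c => if (pd.getD p []).contains c then x.insert (p, c) 1 else x.insert (p, c) 0) := by
      funext x c
      simp only [pvVal]
      split <;> rfl
    rw [this]
  rw [hstep]

theorem B0_flat (pd : PySem.Dict String (List String)) (customers_list : List String)
    (d : PySem.Dict (String × String) Int) :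
    pd.keys.foldl (fun acc path =>
      customers_list.foldl (fun acc customer => acc.insert (path, customer) 0) acc) d
    = (pvL pd customers_list).foldl (fun d k => d.insert k ((fun _ => (0 : Int)) k)) d := by
  unfold pvL
  rw [foldl_flatMap_eq]
  have hstep : (fun (acc : PySem.Dict (String × String) Int) (p : String) =>
      (customers_list.map (fun c => (p, c))).foldl (fun d k => d.insert k ((fun _ => (0 : Int)) k)) acc)
      = (fun acc p => customers_list.foldl (fun acc customer => acc.insert (p, customer) 0) acc) := by
    funext acc p
    rw [List.foldl_map]
  rw [hstep]

theorem B1_flat (pd : PySem.Dict String (List String)) (customers : PySem.Set String)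
    (d : PySem.Dict (String × String) Int) :
    pd.keys.foldl (fun acc path =>
      (pd.getD path []).foldl (fun acc e =>
        if PySem.Set.contains customers e then acc.insert (path, e) 1 else acc) acc) d
    = (pvL2 pd customers).foldl (fun d k => d.insert k ((fun _ => (1 : Int)) k)) d := by
  unfold pvL2
  rw [foldl_flatMap_eq]
  have hstep : (fun (acc : PySem.Dict (String × String) Int) (p : String) =>
      (((pd.getD p []).filter (fun e => PySem.Set.contains customers e)).map (fun e => (p, e))).foldl
        (fun d k => d.insert k ((fun _ => (1 : Int)) k)) acc)
      = (fun acc p => (pd.getD p []).foldl (fun acc e =>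
          if PySem.Set.contains customers e then acc.insert (p, e) 1 else acc) acc) := by
    funext acc p
    rw [List.foldl_map, List.foldl_filter]
  rw [hstep]

theorem calculate_path_customer_allocation_spec : Claim_equal_calculate_path_customer_allocation := by
  intro paths_dict customers_list _
  show _ = _
  unfold calculate_path_customer_allocation calculate_path_customer_allocation_alt
  simp only []
  set pd := PySem.Dict.ofList paths_dict with hpd
  rw [A_flat, B0_flat, B1_flat]
  set L := pvL pd customers_list with hL
  set L2 := pvL2 pd (PySem.Set.ofList customers_list) with hL2
  set dA := L.foldl (fun d k => d.insert k (pvVal pd k)) PySem.Dict.empty with hdA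
  set d0 := L.foldl (fun d k => d.insert k ((fun _ => (0 : Int)) k)) PySem.Dict.empty with hd0
  set dB := L2.foldl (fun d k => d.insert k ((fun _ => (1 : Int)) k)) d0 with hdB
  -- keys of both dicts are the distinct elements of L, in order
  have hkA : dA.keys = PySem.Set.ofList L := by
    rw [hdA, PySem.Dict.keys_foldl_insert, PySem.Dict.keys_empty, PySem.Set.update_nil_left]
  have hk0 : d0.keys = PySem.Set.ofList L := by
    rw [hd0, PySem.Dict.keys_foldl_insert, PySem.Dict.keys_empty, PySem.Set.update_nil_left]
  have hsub : ∀ x ∈ L2, x ∈ PySem.Set.ofList L := by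
    intro x hx
    rw [PySem.Set.mem_ofList]
    rw [hL2] at hx
    unfold pvL2 at hx
    rw [hL]
    unfold pvL
    simp only [List.mem_flatMap, List.mem_map, List.mem_filter] at hx ⊢
    obtain ⟨p, hp, e, ⟨he, hce⟩, rfl⟩ := hx
    have hce' : e ∈ customers_list := by
      rw [PySem.Set.contains_iff, PySem.Set.mem_ofList] at hce; exact hce
    exact ⟨p, hp, e, hce', rfl⟩
  have hkB : dB.keys = PySem.Set.ofList L := by
    rw [hdB, PySem.Dict.keys_foldl_insert, hk0, PySem.Set.update_eq_append_filter]
    have : (PySem.Set.ofList L2).filter (fun y => !(PySem.Set.ofList L).contains y) = [] := by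
      rw [List.filter_eq_nil_iff]
      intro y hy
      have hyL : y ∈ L := (PySem.Set.mem_ofList _ _).1 (hsub y ((PySem.Set.mem_ofList _ _).1 hy))
      simp [hyL]
    rw [this, List.append_nil]
  have hndA : dA.keys.Nodup := by rw [hkA]; exact PySem.Set.nodup_ofList L
  have hndB : dB.keys.Nodup := by rw [hkB]; exact PySem.Set.nodup_ofList L
  rw [PySem.Dict.items_eq_map_keys dA hndA 0, PySem.Dict.items_eq_map_keys dB hndB 0, hkA, hkB,
    List.map_map, List.map_map]
  apply List.map_congr_left
  intro k hk
  have hkL : k ∈ L := (PySem.Set.mem_ofList _ _).1 hk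
  have hgA : dA.getD k 0 = pvVal pd k := by
    rw [hdA, getD_foldl_insert_fn, if_pos hkL]
  have hg0 : d0.getD k 0 = 0 := by
    rw [hd0, getD_foldl_insert_fn, if_pos hkL]
  have hgB : dB.getD k 0 = (if k ∈ L2 then (1 : Int) else 0) := by
    rw [hdB, getD_foldl_insert_fn, hg0]
  -- the key's value agrees: k ∈ L2 iff k.2 occurs in k.1's contents
  have hmem : k ∈ pvL pd customers_list := by rw [hL] at hkL; exact hkL
  unfold pvL at hmem
  simp only [List.mem_flatMap, List.mem_map] at hmem
  obtain ⟨p, hp, c, hc, rfl⟩ := hmem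
  simp only [Function.comp_apply]
  have hiff : (p, c) ∈ L2 ↔ c ∈ pd.getD p [] := by
    rw [hL2]
    unfold pvL2
    simp only [List.mem_flatMap, List.mem_map, List.mem_filter]
    constructor
    · rintro ⟨p', -, e, ⟨he, -⟩, heq⟩
      rw [Prod.mk.injEq] at heq
      obtain ⟨rfl, rfl⟩ := heq
      exact he
    · intro h
      exact ⟨p, hp, c, ⟨h, by rw [PySem.Set.contains_iff, PySem.Set.mem_ofList]; exact hc⟩, rfl⟩
  rw [hgA, hgB]
  unfold pvVal
  by_cases hin : c ∈ pd.getD p []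
  · simp [hin, hiff.2 hin]
  · have hnot : ¬ (p, c) ∈ L2 := fun h => hin (hiff.1 h)
    simp [hin, hnot]
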